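-- pv_equiv track=rewrite | github.com/nf-osi/mafsmith | scripts/compare_maf.py | normalize_hgvsp
-- ===== SOURCE A (Python) =====
-- def normalize_hgvsp(s: str) -> str:
--     """Normalize HGVSp: p.Ter → p.*, Ala → A, etc., for lenient comparison.
--
--     Keep in sync with shorten_hgvsp / THREE_TO_ONE in src/annotation/csq.rs.
--     Note: Rust has Xle→J which is absent here (no practical impact for comparison).
--     """
--     three_to_one = {
--         "Ala": "A", "Arg": "R", "Asn": "N", "Asp": "D", "Cys": "C",
--         "Gln": "Q", "Glu": "E", "Gly": "G", "His": "H", "Ile": "I",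
--         "Leu": "L", "Lys": "K", "Met": "M", "Phe": "F", "Pro": "P",
--         "Ser": "S", "Thr": "T", "Trp": "W", "Tyr": "Y", "Val": "V",
--         "Ter": "*", "Sec": "U", "Pyl": "O", "Xaa": "X",
--     }
--     result = s
--     for three, one in three_to_one.items():
--         result = result.replace(three, one)
--     return result
-- ===== SOURCE B (Python) =====
-- def normalize_hgvsp(s: str) -> str:
--     """Normalize HGVSp by one left-to-right scan: at each position, translate the
--     3-char window via the code table (emit 1-letter code, advance 3) or copy one char."""
--     three_to_one = {
--         "Ala": "A", "Arg": "R", "Asn": "N", "Asp": "D", "Cys": "C",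
--         "Gln": "Q", "Glu": "E", "Gly": "G", "His": "H", "Ile": "I",
--         "Leu": "L", "Lys": "K", "Met": "M", "Phe": "F", "Pro": "P",
--         "Ser": "S", "Thr": "T", "Trp": "W", "Tyr": "Y", "Val": "V",
--         "Ter": "*", "Sec": "U", "Pyl": "O", "Xaa": "X",
--     }
--     out = []
--     i = 0
--     n = len(s)
--     while i < n:
--         one = three_to_one.get(s[i:i + 3])
--         if one is not None:
--             out.append(one)
--             i += 3
--         else:
--             out.append(s[i])
--             i += 1
--     return "".join(out)
-- ===== Notes on version B (the rewrite author's own statement) =====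
-- stated objective: alternative
-- what changed: B makes a single left-to-right windowed scan with one dict lookup per position (emit the 1-letter code and advance 3 on a match, else copy one char), instead of A's 24 sequential full-string str.replace passes.
-- intended difference: On strings containing one of the 9 cascade substrings Alarg, Alasn, Alasp, Leuys, Proyl, Serec, Thrrp, Thryr, Threr - a 3-letter code whose 1-letter replacement together with the next two characters spells a code that A's loop replaces later - A re-replaces the newly created code (it collapses Threr all the way to the terminator mark) while B translates each original 3-letter code exactly once (Threr becomes Ter), which is the intended per-occurrence translation. — e.g. on normalize_hgvsp("Threr"): A returns "*", B returns "Ter"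
import Mathlib
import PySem

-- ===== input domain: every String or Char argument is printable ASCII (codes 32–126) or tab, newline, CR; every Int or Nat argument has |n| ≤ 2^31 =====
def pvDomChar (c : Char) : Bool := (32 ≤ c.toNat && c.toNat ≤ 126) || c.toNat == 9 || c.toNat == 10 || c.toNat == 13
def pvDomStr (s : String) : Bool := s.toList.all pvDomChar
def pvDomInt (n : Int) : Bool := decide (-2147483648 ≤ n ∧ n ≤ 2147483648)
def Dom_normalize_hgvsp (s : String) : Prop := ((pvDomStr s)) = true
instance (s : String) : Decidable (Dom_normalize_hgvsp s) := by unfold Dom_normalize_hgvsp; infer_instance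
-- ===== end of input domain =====

-- B replaces A's 24 sequential full-string `.replace` passes by ONE left-to-right windowed
-- scan with a single table lookup per position (objective: alternative traversal, same cost class).

-- ===== PORT A =====
-- the dict three_to_one, in insertion order, as A's loop iterates over .items()
def pvTableA : List (String × String) :=
  [("Ala", "A"), ("Arg", "R"), ("Asn", "N"), ("Asp", "D"), ("Cys", "C"),
   ("Gln", "Q"), ("Glu", "E"), ("Gly", "G"), ("His", "H"), ("Ile", "I"),
   ("Leu", "L"), ("Lys", "K"), ("Met", "M"), ("Phe", "F"), ("Pro", "P"),
   ("Ser", "S"), ("Thr", "T"), ("Trp", "W"), ("Tyr", "Y"), ("Val", "V"),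
   ("Ter", "*"), ("Sec", "U"), ("Pyl", "O"), ("Xaa", "X")]

-- for three, one in three_to_one.items(): result = result.replace(three, one)
def normalize_hgvsp (s : String) : String :=
  pvTableA.foldl (fun result p => PySem.Str.replace result p.1 p.2) s

-- ===== PORT B =====
-- B's table: the same codes, keys as char lists (3-char windows), values as single chars
def pvCodes : List (List Char × Char) :=
  [(['A','l','a'], 'A'), (['A','r','g'], 'R'), (['A','s','n'], 'N'), (['A','s','p'], 'D'),
   (['C','y','s'], 'C'), (['G','l','n'], 'Q'), (['G','l','u'], 'E'), (['G','l','y'], 'G'),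
   (['H','i','s'], 'H'), (['I','l','e'], 'I'), (['L','e','u'], 'L'), (['L','y','s'], 'K'),
   (['M','e','t'], 'M'), (['P','h','e'], 'F'), (['P','r','o'], 'P'), (['S','e','r'], 'S'),
   (['T','h','r'], 'T'), (['T','r','p'], 'W'), (['T','y','r'], 'Y'), (['V','a','l'], 'V'),
   (['T','e','r'], '*'), (['S','e','c'], 'U'), (['P','y','l'], 'O'), (['X','a','a'], 'X')]

def pvDict : PySem.Dict (List Char) Char := PySem.Dict.ofList pvCodes

-- the while loop: at index i, look the window s[i:i+3] up; emit the code and advance 3,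
-- or copy s[i] and advance 1; ''.join of the emitted pieces
def pvScanGo : Nat → List Char → List Char
  | _, [] => []
  | 0, l => l            -- unreachable: the loop consumes at least one char per step
  | fuel + 1, c :: rest =>
    match PySem.Dict.get? pvDict (List.take 3 (c :: rest)) with
    | some one => one :: pvScanGo fuel (List.drop 2 rest)
    | none => c :: pvScanGo fuel rest

def pvScan (cs : List Char) : List Char := pvScanGo cs.length cs

def normalize_hgvsp_alt (s : String) : String := String.ofList (pvScan s.toList)

-- ===== PRECONDITION & SPEC =====
-- On strings containing one of the 9 cascade substrings (a 3-letter code whose 1-letter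
-- replacement together with the following two characters spells a code replaced later,
-- e.g. "Threr"), A's sequential passes re-replace the newly created code (A "Threr" = "*")
-- while B translates each original code exactly once (B "Threr" = "Ter"), which is the
-- intended per-occurrence translation.
def pvTriggers : List (List Char) :=
  ["Alarg".toList, "Alasn".toList, "Alasp".toList, "Leuys".toList, "Proyl".toList,
   "Serec".toList, "Thrrp".toList, "Thryr".toList, "Threr".toList]

def D_normalize_hgvsp (s : String) : Prop := ∃ t ∈ pvTriggers, PySem.Chars.isIn t s.toList = true
instance (s : String) : Decidable (D_normalize_hgvsp s) := by unfold D_normalize_hgvsp; infer_instance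

def Spec_normalize_hgvsp (s : String) (out : String) : Prop :=
  ¬ D_normalize_hgvsp s → out = normalize_hgvsp_alt s
instance (s : String) (out : String) : Decidable (Spec_normalize_hgvsp s out) := by
  unfold Spec_normalize_hgvsp; infer_instance

def pvDiffWitness_normalize_hgvsp : String := "Threr"
def pvDiffWitnessOut_normalize_hgvsp : String × String := ("*", "Ter")

-- ===== CLAIM (what is proved, stated in full; the proofs are below) =====
def Claim_unchanged_normalize_hgvsp : Prop :=
  ∀ (s : String), Dom_normalize_hgvsp s → Spec_normalize_hgvsp s (normalize_hgvsp s)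
def Claim_changed_normalize_hgvsp : Prop :=
  Dom_normalize_hgvsp (pvDiffWitness_normalize_hgvsp) ∧
  D_normalize_hgvsp (pvDiffWitness_normalize_hgvsp) ∧
  normalize_hgvsp (pvDiffWitness_normalize_hgvsp) = pvDiffWitnessOut_normalize_hgvsp.1 ∧
  normalize_hgvsp_alt (pvDiffWitness_normalize_hgvsp) = pvDiffWitnessOut_normalize_hgvsp.2 ∧
  pvDiffWitnessOut_normalize_hgvsp.1 ≠ pvDiffWitnessOut_normalize_hgvsp.2
def Claim_exact_normalize_hgvsp : Prop :=
  ∀ (s : String), Dom_normalize_hgvsp s → D_normalize_hgvsp s →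
    normalize_hgvsp s ≠ normalize_hgvsp_alt s

-- ===== LEMMAS AND PROOFS =====

-- simple recursion computing Python's s.replace(pat, new) for nonempty pat
def pvRepl (pat new : List Char) : List Char → List Char
  | [] => []
  | c :: t =>
    if pat.isPrefixOf (c :: t) then new ++ pvRepl pat new (t.drop (pat.length - 1))
    else c :: pvRepl pat new t
termination_by l => l.length
decreasing_by
  all_goals simp

-- A's whole loop, on char lists
def pvFold (Ps : List (List Char × Char)) (cs : List Char) : List Char :=
  Ps.foldl (fun r q => pvRepl q.1 [q.2] r) cs

theorem pvRepl_nil (pat new : List Char) : pvRepl pat new [] = [] := by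
  simp [pvRepl]

theorem pvRepl_cons (pat new : List Char) (c : Char) (t : List Char) :
    pvRepl pat new (c :: t) =
      if pat.isPrefixOf (c :: t) then new ++ pvRepl pat new (t.drop (pat.length - 1))
      else c :: pvRepl pat new t := by
  simp [pvRepl]

theorem pvRepl_go (pat new : List Char) (hp : pat ≠ []) :
    ∀ (fuel : Nat) (l acc : List Char), l.length ≤ fuel →
      PySem.Chars.replace.go pat new fuel l acc = acc.reverse ++ pvRepl pat new l := by
  intro fuel
  induction fuel with
  | zero =>
    intro l acc h
    have hl : l = [] := by cases l <;> simp_all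
    subst hl
    rw [PySem.Chars.replace.go.eq_def]
    simp [pvRepl_nil]
  | succ fuel ih =>
    intro l acc h
    cases l with
    | nil => rw [PySem.Chars.replace.go.eq_def]; simp [pvRepl_nil]
    | cons c t =>
      rw [PySem.Chars.replace.go.eq_def]
      simp only []
      by_cases hpre : pat.isPrefixOf (c :: t)
      · rw [if_pos hpre]
        obtain ⟨m, hm⟩ : ∃ m, pat.length = m + 1 := by
          cases hpl : pat.length with
          | zero => exact absurd (List.length_eq_zero_iff.mp hpl) hp
          | succ m => exact ⟨m, rfl⟩
        have hdrop : List.drop pat.length (c :: t) = t.drop (pat.length - 1) := by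
          rw [hm]; simp
        rw [ih _ _ (by simp_all; omega)]
        rw [pvRepl_cons, if_pos hpre, hdrop]
        simp
      · rw [if_neg hpre]
        rw [ih _ _ (by simp_all)]
        rw [pvRepl_cons, if_neg hpre]
        simp

theorem replace_eq_pvRepl (s pat new : List Char) (hp : pat ≠ []) :
    PySem.Chars.replace s pat new = pvRepl pat new s := by
  unfold PySem.Chars.replace
  rw [if_neg (by simp [hp])]
  rw [pvRepl_go pat new hp s.length s [] (le_refl _)]
  simp

theorem pvRepl_cons_neg (pat new : List Char) (c : Char) (t : List Char)
    (h : ¬ pat <+: (c :: t)) : pvRepl pat new (c :: t) = c :: pvRepl pat new t := by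
  rw [pvRepl_cons, if_neg (by simpa [List.isPrefixOf_iff_prefix] using h)]

theorem pvRepl_match3 (a b c : Char) (new t : List Char) :
    pvRepl [a, b, c] new (a :: b :: c :: t) = new ++ pvRepl [a, b, c] new t := by
  rw [pvRepl_cons, if_pos (by simp)]
  simp

theorem pvRepl_head (pat : List Char) (o : Char) (l : List Char) (x : Char)
    (h0 : (pvRepl pat [o] l)[0]? = some x) (hx : x ≠ o) : l[0]? = some x := by
  cases l with
  | nil => simp [pvRepl_nil] at h0
  | cons c t =>
    rw [pvRepl_cons] at h0
    by_cases hpre : pat.isPrefixOf (c :: t)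
    · rw [if_pos hpre] at h0
      simp at h0
      exact absurd h0.symm hx
    · rw [if_neg hpre] at h0
      simpa using h0

theorem pvRepl_second (pat : List Char) (o : Char) (l : List Char) (x y : Char)
    (h0 : (pvRepl pat [o] l)[0]? = some x) (hx : x ≠ o)
    (h1 : (pvRepl pat [o] l)[1]? = some y) (hy : y ≠ o) : l[1]? = some y := by
  cases l with
  | nil => simp [pvRepl_nil] at h0
  | cons c t =>
    rw [pvRepl_cons] at h0 h1
    by_cases hpre : pat.isPrefixOf (c :: t)
    · rw [if_pos hpre] at h0
      simp at h0
      exact absurd h0.symm hx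
    · rw [if_neg hpre] at h1
      simp only [List.getElem?_cons_succ] at h1 ⊢
      exact pvRepl_head pat o t y h1 hy

theorem pvFold_cons (q : List Char × Char) (Ps : List (List Char × Char)) (l : List Char) :
    pvFold (q :: Ps) l = pvFold Ps (pvRepl q.1 [q.2] l) := rfl

theorem pvFold_fst_snd (Ps : List (List Char × Char)) :
    ∀ (l : List Char) (x y : Char),
      (∀ q ∈ Ps, x ≠ q.2 ∧ y ≠ q.2) →
      (pvFold Ps l)[0]? = some x → (pvFold Ps l)[1]? = some y →
      l[0]? = some x ∧ l[1]? = some y := by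
  induction Ps with
  | nil => intro l x y _ h0 h1; exact ⟨h0, h1⟩
  | cons q Ps ih =>
    intro l x y hq h0 h1
    rw [pvFold_cons] at h0 h1
    obtain ⟨hr0, hr1⟩ := ih _ x y (fun p hp => hq p (List.mem_cons_of_mem q hp)) h0 h1
    obtain ⟨hx, hy⟩ := hq q List.mem_cons_self
    exact ⟨pvRepl_head q.1 q.2 l x hr0 hx, pvRepl_second q.1 q.2 l x y hr0 hx hr1 hy⟩

theorem pvFold_head (o : Char) :
    ∀ (Ps : List (List Char × Char)) (τ : List Char),
      (∀ P1 q P2, Ps = P1 ++ q :: P2 → ¬ q.1 <+: (o :: pvFold P1 τ)) →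
      pvFold Ps (o :: τ) = o :: pvFold Ps τ := by
  intro Ps
  induction Ps with
  | nil => intro τ _; rfl
  | cons q Ps ih =>
    intro τ H
    have h0 : ¬ q.1 <+: (o :: τ) := by
      have := H [] q Ps rfl
      simpa [pvFold] using this
    rw [pvFold_cons, pvRepl_cons_neg _ _ _ _ h0, ih (pvRepl q.1 [q.2] τ)]
    · rfl
    · intro P1 p P2 hsplit
      have := H (q :: P1) p P2 (by rw [hsplit]; rfl)
      simpa [pvFold_cons] using this

theorem pv_prefix_head {q : List Char} {b : Char} {r : List Char}
    (h : q <+: (b :: r)) (hne : q ≠ []) : q.head? = some b := by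
  cases q with
  | nil => exact absurd rfl hne
  | cons x xs =>
    obtain ⟨k, hk⟩ := h
    simp at hk
    simp [hk.1]

theorem pvRepl_skip3 (q new : List Char) (a b c : Char) (t : List Char)
    (h1 : q ≠ [a, b, c]) (h2 : q.length = 3)
    (h3 : q.head? ≠ some b) (h4 : q.head? ≠ some c) :
    pvRepl q new (a :: b :: c :: t) = a :: b :: c :: pvRepl q new t := by
  have hne : q ≠ [] := by intro h; rw [h] at h2; simp at h2
  rw [pvRepl_cons_neg _ _ _ _ (fun hpre => h1 (by
        rw [List.prefix_iff_eq_take.mp hpre, h2]; rfl)),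
      pvRepl_cons_neg _ _ _ _ (fun hpre => h3 (pv_prefix_head hpre hne)),
      pvRepl_cons_neg _ _ _ _ (fun hpre => h4 (pv_prefix_head hpre hne))]

theorem pvFold_front3 (a b c : Char) (Ps : List (List Char × Char))
    (h : ∀ q ∈ Ps, q.1 ≠ [a, b, c] ∧ q.1.length = 3 ∧ q.1.head? ≠ some b ∧ q.1.head? ≠ some c) :
    ∀ t, pvFold Ps (a :: b :: c :: t) = a :: b :: c :: pvFold Ps t := by
  induction Ps with
  | nil => intro t; rfl
  | cons q Ps ih =>
    intro t
    obtain ⟨h1, h2, h3, h4⟩ := h q List.mem_cons_self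
    rw [pvFold_cons, pvRepl_skip3 q.1 [q.2] a b c t h1 h2 h3 h4,
        ih (fun p hp => h p (List.mem_cons_of_mem q hp)), pvFold_cons]

theorem pvFold_nil (Ps : List (List Char × Char)) : pvFold Ps [] = [] := by
  induction Ps with
  | nil => rfl
  | cons q Ps ih => rw [pvFold_cons, pvRepl_nil, ih]

-- concrete facts about the table (checked by kernel computation)
theorem fact_len : ∀ q ∈ pvCodes, q.1.length = 3 := by decide
theorem fact_mid : ∀ q ∈ pvCodes, ∀ p ∈ pvCodes, q.1[1]? ≠ some p.2 ∧ q.1[2]? ≠ some p.2 := by decide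
theorem fact_head : ∀ q ∈ pvCodes, ∀ p ∈ pvCodes, q.1.head? ≠ p.1[1]? ∧ q.1.head? ≠ p.1[2]? := by decide
theorem fact_nodup : (pvCodes.map Prod.fst).Nodup := by decide
theorem fact_casc : ∀ i, (hi : i < pvCodes.length) → ∀ j, (hj : j < pvCodes.length) → i < j →
    (pvCodes[j]).1[0]? = some (pvCodes[i]).2 →
    ((pvCodes[i]).1 ++ (pvCodes[j]).1.drop 1) ∈ pvTriggers := by decide

theorem pvDict_items : pvDict.items = pvCodes := by decide

theorem get?_some_mem (w : List Char) (o : Char)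
    (h : PySem.Dict.get? pvDict w = some o) : (w, o) ∈ pvCodes := by
  unfold PySem.Dict.get? at h
  rw [pvDict_items] at h
  obtain ⟨pr, hfind, hsnd⟩ := Option.map_eq_some_iff.mp h
  have hmem := List.mem_of_find?_eq_some hfind
  have hpred := List.find?_some hfind
  have hfst : pr.1 = w := by simpa using hpred
  have : pr = (w, o) := by cases pr; simp_all
  rwa [this] at hmem

theorem get?_none_forall (w : List Char)
    (h : PySem.Dict.get? pvDict w = none) : ∀ q ∈ pvCodes, q.1 ≠ w := by
  unfold PySem.Dict.get? at h
  rw [pvDict_items] at h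
  rw [Option.map_eq_none_iff] at h
  intro q hq
  have := List.find?_eq_none.mp h q hq
  simpa using this

theorem pvFold_append (L1 L2 : List (List Char × Char)) (cs : List Char) :
    pvFold (L1 ++ L2) cs = pvFold L2 (pvFold L1 cs) := by
  simp [pvFold, List.foldl_append]

theorem pvScanGo_irrel : ∀ (f1 f2 : Nat) (l : List Char), l.length ≤ f1 → l.length ≤ f2 →
    pvScanGo f1 l = pvScanGo f2 l := by
  intro f1
  induction f1 with
  | zero =>
    intro f2 l h1 _
    have : l = [] := by cases l <;> simp_all
    subst this
    simp [pvScanGo]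
  | succ f1 ih =>
    intro f2 l h1 h2
    cases l with
    | nil => simp [pvScanGo]
    | cons c rest =>
      cases f2 with
      | zero => simp at h2
      | succ f2 =>
        simp only [pvScanGo]
        cases hg : PySem.Dict.get? pvDict (List.take 3 (c :: rest)) with
        | some o =>
          simp only []
          rw [ih f2 (rest.drop 2) (by simp at h1 ⊢; omega) (by simp at h2 ⊢; omega)]
        | none =>
          simp only []
          rw [ih f2 rest (by simp at h1; omega) (by simp at h2; omega)]

theorem pvScan_cons_some (c : Char) (rest : List Char) (o : Char)
    (hg : PySem.Dict.get? pvDict (List.take 3 (c :: rest)) = some o) :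
    pvScan (c :: rest) = o :: pvScan (rest.drop 2) := by
  unfold pvScan
  simp only [List.length_cons, pvScanGo, hg]
  rw [pvScanGo_irrel rest.length (rest.drop 2).length (rest.drop 2) (by simp) (le_refl _)]

theorem pvScan_cons_none (c : Char) (rest : List Char)
    (hg : PySem.Dict.get? pvDict (List.take 3 (c :: rest)) = none) :
    pvScan (c :: rest) = c :: pvScan rest := by
  unfold pvScan
  simp only [List.length_cons, pvScanGo, hg]

theorem pv_len3 (q : List Char × Char) (hq : q ∈ pvCodes) :
    ∃ q0 q1 q2, q.1 = [q0, q1, q2] :=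
  List.length_eq_three.mp (fact_len q hq)

theorem pv_prefix2 (q1 q2 : Char) (r : List Char) (h : [q1, q2] <+: r) :
    r[0]? = some q1 ∧ r[1]? = some q2 := by
  obtain ⟨k, hk⟩ := h
  subst hk
  simp

theorem pv_prefix2_of (q1 q2 : Char) (r : List Char)
    (h0 : r[0]? = some q1) (h1 : r[1]? = some q2) : ∃ r', r = q1 :: q2 :: r' := by
  cases r with
  | nil => simp at h0
  | cons a r =>
    cases r with
    | nil => simp at h1
    | cons b r => simp at h0 h1; exact ⟨r, by rw [h0, h1]⟩

theorem pv_split_ne (P1 P2 : List (List Char × Char)) (k : List Char × Char)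
    (hsplit : pvCodes = P1 ++ k :: P2) (q : List Char × Char) (hq : q ∈ P1) :
    q.1 ≠ k.1 := by
  have hnd := fact_nodup
  rw [hsplit] at hnd
  simp only [List.map_append, List.map_cons, List.nodup_append] at hnd
  intro he
  exact hnd.2.2 q.1 (List.mem_map_of_mem hq) k.1 List.mem_cons_self he

-- the two index computations used with fact_casc
theorem pv_getElem?_mid (P1 P2 : List (List Char × Char)) (k : List Char × Char)
    (hsplit : pvCodes = P1 ++ k :: P2) : pvCodes[P1.length]? = some k := by
  rw [hsplit, List.getElem?_append_right (le_refl _)]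
  simp

theorem pv_getElem?_mid2 (P1 Q1 Q2 : List (List Char × Char)) (k q : List Char × Char)
    (hsplit : pvCodes = P1 ++ k :: (Q1 ++ q :: Q2)) :
    pvCodes[P1.length + 1 + Q1.length]? = some q := by
  rw [hsplit, List.getElem?_append_right (by omega)]
  have h1 : P1.length + 1 + Q1.length - P1.length = Q1.length + 1 := by omega
  rw [h1]
  simp only [List.getElem?_cons_succ]
  rw [List.getElem?_append_right (le_refl _)]
  simp

theorem pvFold_nomatch (c : Char) (rest : List Char)
    (hg : PySem.Dict.get? pvDict (List.take 3 (c :: rest)) = none) :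
    pvFold pvCodes (c :: rest) = c :: pvFold pvCodes rest := by
  apply pvFold_head
  intro P1 q P2 hsplit hpre
  have hqmem : q ∈ pvCodes := by
    rw [hsplit]; exact List.mem_append_right _ List.mem_cons_self
  obtain ⟨q0, q1, q2, hq3⟩ := pv_len3 q hqmem
  rw [hq3, List.cons_prefix_cons] at hpre
  obtain ⟨hq0, hpre2⟩ := hpre
  obtain ⟨h0, h1⟩ := pv_prefix2 q1 q2 _ hpre2
  have hsub : ∀ p ∈ P1, p ∈ pvCodes := fun p hp => by
    rw [hsplit]; exact List.mem_append_left _ hp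
  have hcond : ∀ p ∈ P1, q1 ≠ p.2 ∧ q2 ≠ p.2 := by
    intro p hp
    have hm := fact_mid q hqmem p (hsub p hp)
    rw [hq3] at hm
    simp only [List.getElem?_cons_succ, List.getElem?_cons_zero] at hm
    exact ⟨fun he => hm.1 (by rw [he]), fun he => hm.2 (by rw [he])⟩
  obtain ⟨hr0, hr1⟩ := pvFold_fst_snd P1 rest q1 q2 hcond h0 h1
  obtain ⟨r', hr⟩ := pv_prefix2_of q1 q2 rest hr0 hr1
  have := get?_none_forall _ hg q hqmem
  apply this
  rw [hq3, hr, hq0]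
  rfl

theorem pvFold_match (c b c' o : Char) (rest' : List Char)
    (hkmem : ([c, b, c'], o) ∈ pvCodes)
    (hloc : ∀ t ∈ pvTriggers, ¬ t <+: (c :: b :: c' :: rest')) :
    pvFold pvCodes (c :: b :: c' :: rest') = o :: pvFold pvCodes rest' := by
  obtain ⟨P1, P2, hsplit⟩ := List.append_of_mem hkmem
  have hsubP1 : ∀ p ∈ P1, p ∈ pvCodes := fun p hp => by
    rw [hsplit]; exact List.mem_append_left _ hp
  have hfront : pvFold P1 (c :: b :: c' :: rest') = c :: b :: c' :: pvFold P1 rest' := by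
    apply pvFold_front3
    intro q hq
    have hqc : q ∈ pvCodes := hsubP1 q hq
    have hh := fact_head q hqc ([c, b, c'], o) hkmem
    simp only [List.getElem?_cons_succ, List.getElem?_cons_zero] at hh
    exact ⟨pv_split_ne P1 P2 _ hsplit q hq, fact_len q hqc, hh.1, hh.2⟩
  have hfold1 : pvFold pvCodes (c :: b :: c' :: rest')
      = pvFold P2 (o :: pvRepl [c, b, c'] [o] (pvFold P1 rest')) := by
    rw [hsplit, pvFold_append, hfront, pvFold_cons]
    simp only []
    rw [pvRepl_match3]
    rfl
  have hhead : pvFold P2 (o :: pvRepl [c, b, c'] [o] (pvFold P1 rest'))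
      = o :: pvFold P2 (pvRepl [c, b, c'] [o] (pvFold P1 rest')) := by
    apply pvFold_head
    intro Q1 q Q2 hsplit2 hpre
    have hsplit' : pvCodes = P1 ++ ([c, b, c'], o) :: (Q1 ++ q :: Q2) := by
      rw [hsplit, hsplit2]
    have hqmem : q ∈ pvCodes := by
      rw [hsplit']
      exact List.mem_append_right _
        (List.mem_cons_of_mem _ (List.mem_append_right _ List.mem_cons_self))
    obtain ⟨q0, q1, q2, hq3⟩ := pv_len3 q hqmem
    rw [hq3, List.cons_prefix_cons] at hpre
    obtain ⟨hq0, hpre2⟩ := hpre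
    obtain ⟨h0, h1⟩ := pv_prefix2 q1 q2 _ hpre2
    have hsubQ1 : ∀ p ∈ Q1, p ∈ pvCodes := fun p hp => by
      rw [hsplit']
      exact List.mem_append_right _ (List.mem_cons_of_mem _ (List.mem_append_left _ hp))
    have hmidq := fact_mid q hqmem
    have hcondQ : ∀ p ∈ Q1, q1 ≠ p.2 ∧ q2 ≠ p.2 := by
      intro p hp
      have hm := hmidq p (hsubQ1 p hp)
      rw [hq3] at hm
      simp only [List.getElem?_cons_succ, List.getElem?_cons_zero] at hm
      exact ⟨fun he => hm.1 (by rw [he]), fun he => hm.2 (by rw [he])⟩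
    obtain ⟨hX0, hX1⟩ := pvFold_fst_snd Q1 _ q1 q2 hcondQ h0 h1
    have hmk := hmidq ([c, b, c'], o) hkmem
    rw [hq3] at hmk
    simp only [List.getElem?_cons_succ, List.getElem?_cons_zero] at hmk
    have hq1o : q1 ≠ o := fun he => hmk.1 (by rw [he])
    have hq2o : q2 ≠ o := fun he => hmk.2 (by rw [he])
    have hs0 := pvRepl_head [c, b, c'] o _ q1 hX0 hq1o
    have hs1 := pvRepl_second [c, b, c'] o _ q1 q2 hX0 hq1o hX1 hq2o
    have hcondP : ∀ p ∈ P1, q1 ≠ p.2 ∧ q2 ≠ p.2 := by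
      intro p hp
      have hm := hmidq p (hsubP1 p hp)
      rw [hq3] at hm
      simp only [List.getElem?_cons_succ, List.getElem?_cons_zero] at hm
      exact ⟨fun he => hm.1 (by rw [he]), fun he => hm.2 (by rw [he])⟩
    obtain ⟨ht0, ht1⟩ := pvFold_fst_snd P1 rest' q1 q2 hcondP hs0 hs1
    obtain ⟨r'', hr''⟩ := pv_prefix2_of q1 q2 rest' ht0 ht1
    obtain ⟨hik, hkk⟩ := List.getElem?_eq_some_iff.mp (pv_getElem?_mid P1 _ _ hsplit)
    obtain ⟨hjq, hqq⟩ :=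
      List.getElem?_eq_some_iff.mp (pv_getElem?_mid2 P1 Q1 Q2 _ q hsplit')
    have htrig := fact_casc P1.length hik (P1.length + 1 + Q1.length) hjq
      (by omega) (by rw [hkk, hqq, hq3, hq0]; rfl)
    rw [hkk, hqq, hq3] at htrig
    apply hloc _ (by simpa using htrig)
    rw [hr'']
    exact ⟨r'', rfl⟩
  have hback : pvFold pvCodes rest'
      = pvFold P2 (pvRepl [c, b, c'] [o] (pvFold P1 rest')) := by
    rw [hsplit, pvFold_append, pvFold_cons]
  rw [hfold1, hhead, ← hback]

theorem pv_main : ∀ (n : Nat) (cs : List Char), cs.length ≤ n →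
    (∀ t ∈ pvTriggers, ¬ t <:+: cs) → pvFold pvCodes cs = pvScan cs := by
  intro n
  induction n with
  | zero =>
    intro cs h _
    have : cs = [] := by cases cs <;> simp_all
    subst this
    rw [pvFold_nil]; rfl
  | succ n ih =>
    intro cs hlen hTF
    cases cs with
    | nil => rw [pvFold_nil]; rfl
    | cons c rest =>
      cases hg : PySem.Dict.get? pvDict (List.take 3 (c :: rest)) with
      | none =>
        rw [pvScan_cons_none c rest hg, pvFold_nomatch c rest hg,
            ih rest (by simp at hlen; omega)
              (fun t ht hinf => hTF t ht (List.infix_cons hinf))]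
      | some o =>
        have hkmem := get?_some_mem _ _ hg
        have hlen3 : (List.take 3 (c :: rest)).length = 3 := fact_len _ hkmem
        have hlen2 : 2 ≤ rest.length := by simp at hlen3; omega
        obtain ⟨b, c', rest', hrest⟩ : ∃ b c' rest', rest = b :: c' :: rest' := by
          cases rest with
          | nil => simp at hlen2
          | cons x r =>
            cases r with
            | nil => simp at hlen2
            | cons y r' => exact ⟨x, y, r', rfl⟩
        have hkey : List.take 3 (c :: rest) = [c, b, c'] := by rw [hrest]; rfl
        rw [hkey] at hkmem
        have hdrop : rest.drop 2 = rest' := by rw [hrest]; rfl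
        rw [pvScan_cons_some c rest o hg, hdrop, hrest,
            pvFold_match c b c' o rest' hkmem
              (fun t ht hp => hTF t ht (by rw [hrest]; exact hp.isInfix)),
            ih rest' (by rw [hrest] at hlen; simp at hlen; omega)
              (fun t ht hinf => hTF t ht (by
                rw [hrest]
                exact List.infix_cons (List.infix_cons (List.infix_cons hinf))))]

theorem pvRepl_keep1 (pat new : List Char) (z : Char) (l : List Char)
    (hp : pat ≠ []) (hz : pat.head? ≠ some z) :
    pvRepl pat new (z :: l) = z :: pvRepl pat new l :=
  pvRepl_cons_neg pat new z l (fun hpre => hz (pv_prefix_head hpre hp))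

theorem pvFold_keep1 (z : Char) (Ps : List (List Char × Char))
    (h : ∀ r ∈ Ps, r.1 ≠ [] ∧ r.1.head? ≠ some z) :
    ∀ l, pvFold Ps (z :: l) = z :: pvFold Ps l := by
  induction Ps with
  | nil => intro l; rfl
  | cons r Ps ih =>
    intro l
    obtain ⟨h1, h2⟩ := h r List.mem_cons_self
    rw [pvFold_cons, pvRepl_keep1 r.1 [r.2] z l h1 h2,
        ih (fun p hp => h p (List.mem_cons_of_mem r hp)), pvFold_cons]

theorem pvFold_keep2 (x y : Char) (Ps : List (List Char × Char))
    (h : ∀ r ∈ Ps, r.1 ≠ [] ∧ r.1.head? ≠ some x ∧ r.1.head? ≠ some y) :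
    ∀ l, pvFold Ps (x :: y :: l) = x :: y :: pvFold Ps l := by
  induction Ps with
  | nil => intro l; rfl
  | cons r Ps ih =>
    intro l
    obtain ⟨h1, h2, h3⟩ := h r List.mem_cons_self
    rw [pvFold_cons, pvRepl_keep1 r.1 [r.2] x _ h1 h2, pvRepl_keep1 r.1 [r.2] y l h1 h3,
        ih (fun p hp => h p (List.mem_cons_of_mem r hp)), pvFold_cons]

theorem fact_triglen : ∀ t ∈ pvTriggers, t.length = 5 := by decide
theorem fact_tk3 : ∀ t ∈ pvTriggers, ∃ k ∈ pvCodes, t.take 3 = k.1 := by decide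
theorem fact_inj : ∀ p ∈ pvCodes, ∀ q ∈ pvCodes, p.1 = q.1 → p = q := by decide
theorem fact_trig : ∀ t ∈ pvTriggers, ∀ i, (hi : i < pvCodes.length) →
    (pvCodes[i]).1 <+: t →
    ((pvCodes.drop (i + 1)).any (fun q =>
      decide (q.1 = (pvCodes[i]).2 :: t.drop 3) && decide (q.2 ≠ (pvCodes[i]).2) &&
      pvCodes.all (fun r => decide (r.1.head? ≠ some q.2)))) = true := by decide

-- a trigger cannot sit at a position whose character is the 2nd/3rd char of some code
theorem pv_trig_not_mid (t : List Char) (ht : t ∈ pvTriggers) (z : Char) (l : List Char)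
    (hz : ∀ k0 ∈ pvCodes, k0.1.head? ≠ some z) (hp : t <+: z :: l) : False := by
  obtain ⟨k0, hk0, htk⟩ := fact_tk3 t ht
  have hk0p : k0.1 <+: z :: l :=
    List.IsPrefix.trans (htk ▸ List.take_prefix 3 t) hp
  have hk0ne : k0.1 ≠ [] := by
    have := fact_len k0 hk0; intro h; rw [h] at this; simp at this
  exact hz k0 hk0 (pv_prefix_head hk0p hk0ne)

theorem pv_tight : ∀ (n : Nat) (cs : List Char), cs.length ≤ n →
    (∃ t ∈ pvTriggers, t <:+: cs) → pvFold pvCodes cs ≠ pvScan cs := by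
  intro n
  induction n with
  | zero =>
    intro cs h htrig
    have : cs = [] := by cases cs <;> simp_all
    subst this
    obtain ⟨t, ht, hinf⟩ := htrig
    have : t = [] := List.eq_nil_of_infix_nil hinf
    have := fact_triglen t ht
    simp_all
  | succ n ih =>
    intro cs hlen htrig
    cases cs with
    | nil =>
      obtain ⟨t, ht, hinf⟩ := htrig
      have : t = [] := List.eq_nil_of_infix_nil hinf
      have := fact_triglen t ht
      simp_all
    | cons c rest =>
      cases hg : PySem.Dict.get? pvDict (List.take 3 (c :: rest)) with
      | none =>
        rw [pvScan_cons_none c rest hg, pvFold_nomatch c rest hg]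
        obtain ⟨t, ht, hinf⟩ := htrig
        rcases List.infix_cons_iff.mp hinf with hp | hinf'
        · -- a trigger at position 0 starts with a code, so the window would match
          exfalso
          obtain ⟨k0, hk0, htk⟩ := fact_tk3 t ht
          have hk0p : k0.1 <+: c :: rest :=
            List.IsPrefix.trans (htk ▸ List.take_prefix 3 t) hp
          have hk0t : k0.1 = List.take 3 (c :: rest) := by
            have h3 := fact_len k0 hk0
            rw [List.prefix_iff_eq_take.mp hk0p, h3]
          exact get?_none_forall _ hg k0 hk0 hk0t
        · intro he
          exact ih rest (by simp at hlen; omega) ⟨t, ht, hinf'⟩ (List.cons_injective he)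
      | some o =>
        have hkmem := get?_some_mem _ _ hg
        have hlen3 : (List.take 3 (c :: rest)).length = 3 := fact_len _ hkmem
        have hlen2 : 2 ≤ rest.length := by simp at hlen3; omega
        obtain ⟨b, c', rest', hrest⟩ : ∃ b c' rest', rest = b :: c' :: rest' := by
          cases rest with
          | nil => simp at hlen2
          | cons x r =>
            cases r with
            | nil => simp at hlen2
            | cons y r' => exact ⟨x, y, r', rfl⟩
        have hkey : List.take 3 (c :: rest) = [c, b, c'] := by rw [hrest]; rfl
        rw [hkey] at hkmem
        have hdrop : rest.drop 2 = rest' := by rw [hrest]; rfl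
        rw [pvScan_cons_some c rest o hg, hdrop, hrest]
        by_cases htrig0 : ∃ t ∈ pvTriggers, t <+: (c :: b :: c' :: rest')
        · -- the cascade fires at position 0: A's head becomes the cascaded code, B's stays o
          obtain ⟨t0, ht0, hp0⟩ := htrig0
          -- t0 = [c,b,c'] ++ [x,y] and rest' = x :: y :: r''
          obtain ⟨k0, hk0, htk⟩ := fact_tk3 t0 ht0
          have hk0p : k0.1 <+: c :: b :: c' :: rest' :=
            List.IsPrefix.trans (htk ▸ List.take_prefix 3 t0) hp0
          have hk0t : k0.1 = [c, b, c'] := by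
            have h3 := fact_len k0 hk0
            rw [List.prefix_iff_eq_take.mp hk0p, h3]
            rfl
          have hk0eq : k0 = ([c, b, c'], o) := fact_inj k0 hk0 _ hkmem hk0t
          obtain ⟨x, y, hxy⟩ : ∃ x y, t0.drop 3 = [x, y] := by
            apply List.length_eq_two.mp
            have := fact_triglen t0 ht0
            simp [this]
          have ht0eq : t0 = [c, b, c'] ++ [x, y] := by
            rw [← hk0t, ← htk, ← hxy]
            simp
          have hrest' : ∃ r'', rest' = x :: y :: r'' := by
            rw [ht0eq] at hp0
            obtain ⟨u, hu⟩ := hp0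
            simp at hu
            exact ⟨u, hu.symm⟩
          obtain ⟨r'', hr''⟩ := hrest'
          -- locate k and the cascade partner q in the table
          obtain ⟨P1, P2, hsplit⟩ := List.append_of_mem hkmem
          obtain ⟨hik, hkk⟩ := List.getElem?_eq_some_iff.mp (pv_getElem?_mid P1 _ _ hsplit)
          have hdropP2 : pvCodes.drop (P1.length + 1) = P2 := by
            rw [hsplit, show P1 ++ ([c, b, c'], o) :: P2 = (P1 ++ [([c, b, c'], o)]) ++ P2 by simp,
                List.drop_left' (by simp)]
          have hany := fact_trig t0 ht0 P1.length hik
            (by rw [hkk]; rw [ht0eq]; exact ⟨[x, y], rfl⟩)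
          rw [hdropP2] at hany
          obtain ⟨q, hqP2, hq⟩ := List.any_eq_true.mp hany
          rw [hkk] at hq
          simp only [Bool.and_eq_true, decide_eq_true_eq, List.all_eq_true] at hq
          obtain ⟨⟨hq1, hq2⟩, hq3⟩ := hq
          rw [hxy] at hq1
          -- compute A's head
          have hqmem : q ∈ pvCodes := by
            rw [hsplit]; exact List.mem_append_right _ (List.mem_cons_of_mem _ hqP2)
          obtain ⟨Q1, Q2, hsplit2⟩ := List.append_of_mem hqP2
          have hsplit' : pvCodes = (P1 ++ ([c, b, c'], o) :: Q1) ++ q :: Q2 := by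
            rw [hsplit, hsplit2]; simp
          have hsubP1 : ∀ p ∈ P1, p ∈ pvCodes := fun p hp => by
            rw [hsplit]; exact List.mem_append_left _ hp
          have hsubQ1 : ∀ p ∈ Q1, p ∈ pvCodes := fun p hp => by
            rw [hsplit']
            exact List.mem_append_left _ (List.mem_append_right _ (List.mem_cons_of_mem _ hp))
          -- heads x and y are 2nd/3rd chars of q, no code starts with them
          have hxhead : ∀ p ∈ pvCodes, p.1.head? ≠ some x ∧ p.1.head? ≠ some y := by
            intro p hp
            have := fact_head p hp q hqmem
            rw [hq1] at this
            simpa using this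
          have hfront : pvFold P1 (c :: b :: c' :: rest') = c :: b :: c' :: pvFold P1 rest' := by
            apply pvFold_front3
            intro p hp
            have hpc : p ∈ pvCodes := hsubP1 p hp
            have hh := fact_head p hpc ([c, b, c'], o) hkmem
            simp only [List.getElem?_cons_succ, List.getElem?_cons_zero] at hh
            exact ⟨pv_split_ne P1 P2 _ hsplit p hp, fact_len p hpc, hh.1, hh.2⟩
          have hkeep1 : pvFold P1 rest' = x :: y :: pvFold P1 r'' := by
            rw [hr'']
            apply pvFold_keep2
            intro r hr
            have hrc : r ∈ pvCodes := hsubP1 r hr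
            refine ⟨?_, (hxhead r hrc).1, (hxhead r hrc).2⟩
            have := fact_len r hrc; intro hnil; rw [hnil] at this; simp at this
          have hX : pvRepl [c, b, c'] [o] (pvFold P1 (c :: b :: c' :: rest'))
              = o :: x :: y :: pvRepl [c, b, c'] [o] (pvFold P1 r'') := by
            rw [hfront, pvRepl_match3, hkeep1]
            have hh := hxhead ([c, b, c'], o) hkmem
            rw [pvRepl_keep1 _ _ x _ (by simp) (by simpa using hh.1),
                pvRepl_keep1 _ _ y _ (by simp) (by simpa using hh.2)]
            rfl
          -- P2 = Q1 ++ q :: Q2 : pass Q1 through, fire q, keep head q.2 through Q2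
          have hfrontQ : ∀ l, pvFold Q1 (o :: x :: y :: l) = o :: x :: y :: pvFold Q1 l := by
            intro l
            have h3 : pvFold Q1 (o :: x :: y :: l) = o :: x :: y :: pvFold Q1 l := by
              apply pvFold_front3
              intro p hp
              have hpc : p ∈ pvCodes := hsubQ1 p hp
              refine ⟨?_, fact_len p hpc, (hxhead p hpc).1, (hxhead p hpc).2⟩
              rw [← hq1]
              exact pv_split_ne (P1 ++ ([c, b, c'], o) :: Q1) Q2 q hsplit' p
                (List.mem_append_right _ (List.mem_cons_of_mem _ hp))
            exact h3
          have hA : pvFold pvCodes (c :: b :: c' :: rest')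
              = q.2 :: pvFold Q2 (pvRepl q.1 [q.2]
                  (pvFold Q1 (pvRepl [c, b, c'] [o] (pvFold P1 r'')))) := by
            rw [hsplit, pvFold_append, pvFold_cons, hX, hsplit2, pvFold_append, pvFold_cons,
                hfrontQ, hq1, pvRepl_match3]
            simp only [List.singleton_append]
            rw [pvFold_keep1 q.2 Q2 (fun r hr => by
              have hrc : r ∈ pvCodes := by
                rw [hsplit']
                exact List.mem_append_right _ (List.mem_cons_of_mem _ hr)
              refine ⟨?_, hq3 r hrc⟩
              have := fact_len r hrc; intro hnil; rw [hnil] at this; simp at this), ← hq1]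
          rw [hA]
          intro he
          injection he with h1 _
          exact hq2 h1
        · have htrig0' : ∀ t ∈ pvTriggers, ¬ t <+: (c :: b :: c' :: rest') :=
            fun t ht hp => htrig0 ⟨t, ht, hp⟩
          rw [pvFold_match c b c' o rest' hkmem htrig0']
          obtain ⟨t, ht, hinf⟩ := htrig
          rw [hrest] at hinf
          have hnomid : ∀ (z : Char) (l : List Char),
              (∀ k0 ∈ pvCodes, k0.1.head? ≠ some z) → ¬ t <+: z :: l := by
            intro z l hz hp
            exact pv_trig_not_mid t ht z l hz hp
          have hbfact : ∀ k0 ∈ pvCodes, k0.1.head? ≠ some b := fun k0 hk0 => by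
            have := fact_head k0 hk0 ([c, b, c'], o) hkmem
            simpa using this.1
          have hcfact : ∀ k0 ∈ pvCodes, k0.1.head? ≠ some c' := fun k0 hk0 => by
            have := fact_head k0 hk0 ([c, b, c'], o) hkmem
            simpa using this.2
          have hinf' : t <:+: rest' := by
            rcases List.infix_cons_iff.mp hinf with hp | h1
            · exact absurd hp (htrig0' t ht)
            rcases List.infix_cons_iff.mp h1 with hp | h2
            · exact absurd hp (hnomid b _ hbfact)
            rcases List.infix_cons_iff.mp h2 with hp | h3
            · exact absurd hp (hnomid c' _ hcfact)
            exact h3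
          intro he
          exact ih rest' (by rw [hrest] at hlen; simp at hlen; omega) ⟨t, ht, hinf'⟩
            (List.cons_injective he)

theorem bridgeA : ∀ (L : List (String × String)) (s : String),
    (∀ p ∈ L, p.1.toList ≠ []) →
    (L.foldl (fun r p => PySem.Str.replace r p.1 p.2) s).toList
      = L.foldl (fun r p => pvRepl p.1.toList p.2.toList r) s.toList := by
  intro L
  induction L with
  | nil => intro s _; rfl
  | cons p L ih =>
    intro s h
    simp only [List.foldl_cons]
    rw [ih _ (fun q hq => h q (List.mem_cons_of_mem p hq))]
    rw [PySem.Str.toList_replace,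
        replace_eq_pvRepl _ _ _ (h p List.mem_cons_self)]

theorem normalize_toList (s : String) :
    (normalize_hgvsp s).toList = pvFold pvCodes s.toList := by
  unfold normalize_hgvsp
  rw [bridgeA pvTableA s (by decide)]
  have hmap : pvTableA.map (fun p => (p.1.toList, p.2.toList))
      = pvCodes.map (fun q => (q.1, [q.2])) := by decide
  calc pvTableA.foldl (fun r p => pvRepl p.1.toList p.2.toList r) s.toList
      = (pvTableA.map (fun p => (p.1.toList, p.2.toList))).foldl
          (fun r q => pvRepl q.1 q.2 r) s.toList := by rw [List.foldl_map]
    _ = (pvCodes.map (fun q => (q.1, [q.2]))).foldl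
          (fun r q => pvRepl q.1 q.2 r) s.toList := by rw [hmap]
    _ = pvFold pvCodes s.toList := by rw [List.foldl_map]; rfl

-- ===== VERDICT (by name: the statement is the Claim_ definition above) =====
theorem normalize_hgvsp_spec : Claim_unchanged_normalize_hgvsp := by
  intro s _ hnd
  have hTF : ∀ t ∈ pvTriggers, ¬ t <:+: s.toList := by
    intro t ht hinf
    exact hnd ⟨t, ht, (PySem.Chars.isIn_iff_infix t s.toList).mpr hinf⟩
  have h1 : (normalize_hgvsp s).toList = (normalize_hgvsp_alt s).toList := by
    rw [normalize_toList, pv_main s.toList.length s.toList (le_refl _) hTF]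
    unfold normalize_hgvsp_alt
    simp
  exact String.toList_inj.mp h1

set_option maxRecDepth 10000 in
theorem normalize_hgvsp_changed : Claim_changed_normalize_hgvsp := by
  unfold Claim_changed_normalize_hgvsp; decide

theorem normalize_hgvsp_tight : Claim_exact_normalize_hgvsp := by
  intro s _ hd he
  obtain ⟨t, ht, hisin⟩ := hd
  have hinf := (PySem.Chars.isIn_iff_infix t s.toList).mp hisin
  have h1 : (normalize_hgvsp s).toList = (normalize_hgvsp_alt s).toList := by rw [he]
  rw [normalize_toList] at h1
  have h2 : (normalize_hgvsp_alt s).toList = pvScan s.toList := by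
    unfold normalize_hgvsp_alt; simp
  rw [h2] at h1
  exact pv_tight s.toList.length s.toList (le_refl _) ⟨t, ht, hinf⟩ h1
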